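-- pv_equiv track=rewrite | github.com/QuaesitorScientiae/ML_sandbox | Dataset_telegram_2_category.py | remove_chars_from_text
-- ===== SOURCE A (Python) =====
-- def remove_chars_from_text(text, chars):
--     # return "".join([ch for ch in text if ch not in chars])
--     content = ''
--     for ch in text:
--         if ch not in chars:
--             content = content + ''.join(ch)
--         else:
--             content = content + ''.join(' ')
--     return content
-- ===== SOURCE B (Python) =====
-- def remove_chars_from_text(text, chars):
--     result = text
--     for c in chars:
--         result = result.replace(c, ' ')
--     return result
-- ===== Notes on version B (the rewrite author's own statement) =====
-- stated objective: idiomatic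
-- what changed: Instead of walking the text once and testing per-character membership in chars, B starts from the text and performs one str.replace(c, ' ') per character of chars; since every target maps to the same space and replacement is idempotent, the result is identical.
import Mathlib
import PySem

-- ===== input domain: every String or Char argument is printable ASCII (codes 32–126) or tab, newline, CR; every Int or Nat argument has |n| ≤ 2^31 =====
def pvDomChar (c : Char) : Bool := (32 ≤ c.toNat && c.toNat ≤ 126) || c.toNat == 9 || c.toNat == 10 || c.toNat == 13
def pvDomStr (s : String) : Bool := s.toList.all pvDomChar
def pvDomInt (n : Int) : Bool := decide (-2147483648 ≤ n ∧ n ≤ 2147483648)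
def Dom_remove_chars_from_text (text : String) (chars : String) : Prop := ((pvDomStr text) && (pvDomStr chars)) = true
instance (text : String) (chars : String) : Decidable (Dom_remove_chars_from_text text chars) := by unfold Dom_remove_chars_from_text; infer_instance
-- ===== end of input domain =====

-- B replaces A's single pass with membership tests by one str.replace(c, ' ') per character of
-- chars (same result: every target maps to space and replacement is idempotent); same cost.

-- ===== PORT A =====
-- for ch in text: content += ch if ch not in chars else ' '
def remove_chars_from_text (text : String) (chars : String) : String :=
  String.ofList <|
    text.toList.foldl
      (fun content ch =>
        if PySem.Str.isIn (String.ofList [ch]) chars = false then content ++ [ch]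
        else content ++ [' '])
      []

-- ===== PORT B =====
-- result = text; for c in chars: result = result.replace(c, ' ')
def remove_chars_from_text_alt (text : String) (chars : String) : String :=
  chars.toList.foldl (fun result c => PySem.Str.replace result (String.ofList [c]) " ") text

-- ===== PRECONDITION & SPEC =====
def Spec_remove_chars_from_text (text : String) (chars : String) (out : String) : Prop := out = remove_chars_from_text_alt text chars
instance (text : String) (chars : String) (out : String) : Decidable (Spec_remove_chars_from_text text chars out) := by unfold Spec_remove_chars_from_text; infer_instance

-- ===== CLAIM (what is proved, stated in full; the proofs are below) =====
def Claim_equal_remove_chars_from_text : Prop := ∀ (text : String) (chars : String), Dom_remove_chars_from_text text chars → Spec_remove_chars_from_text text chars (remove_chars_from_text text chars)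

-- ===== LEMMAS AND PROOFS =====

-- replacing a single char by a single char is a pointwise map
theorem replace_go_singleton (a b : Char) (fuel : Nat) :
    ∀ (l acc : List Char), l.length ≤ fuel →
      PySem.Chars.replace.go [a] [b] fuel l acc
        = acc.reverse ++ l.map (fun x => if x = a then b else x) := by
  induction fuel with
  | zero =>
    intro l acc h
    have : l = [] := List.length_eq_zero_iff.mp (Nat.le_zero.mp h)
    subst this
    simp [PySem.Chars.replace.go]
  | succ n ih =>
    intro l acc h
    cases l with
    | nil => simp [PySem.Chars.replace.go]
    | cons c t =>
      have ht : t.length ≤ n := by simpa using Nat.le_of_succ_le_succ h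
      by_cases hc : a = c
      · subst hc
        simp [PySem.Chars.replace.go, ih t _ ht]
      · simp [PySem.Chars.replace.go, ih t _ ht, hc, Ne.symm hc]

theorem replace_singleton (a b : Char) (l : List Char) :
    PySem.Chars.replace l [a] [b] = l.map (fun x => if x = a then b else x) := by
  simp only [PySem.Chars.replace, List.isEmpty_cons]
  simpa using replace_go_singleton a b l.length l [] (le_refl _)

theorem alt_toList (cs : List Char) : ∀ (l : List Char),
    (cs.foldl (fun result c => PySem.Str.replace result (String.ofList [c]) " ")
        (String.ofList l)).toList
      = l.map (fun x => if x ∈ cs then ' ' else x) := by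
  induction cs with
  | nil => intro l; simp
  | cons c cs ih =>
    intro l
    have step : PySem.Str.replace (String.ofList l) (String.ofList [c]) " "
        = String.ofList (l.map (fun x => if x = c then ' ' else x)) := by
      apply String.toList_injective
      simp [PySem.Str.toList_replace, replace_singleton]
    simp only [List.foldl_cons, step, ih, List.map_map]
    apply List.map_congr_left
    intro x _
    by_cases hx : x = c
    · subst hx; simp
    · simp [hx, Function.comp]

theorem a_toList (text chars : String) :
    (remove_chars_from_text text chars).toList
      = text.toList.map (fun x => if x ∈ chars.toList then ' ' else x) := by
  unfold remove_chars_from_text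
  rw [String.toList_ofList]
  have hf : (fun (content : List Char) (ch : Char) =>
      if PySem.Str.isIn (String.ofList [ch]) chars = false then content ++ [ch]
      else content ++ [' '])
    = fun content ch => content ++
        [if PySem.Str.isIn (String.ofList [ch]) chars = false then ch else ' '] := by
    funext content ch; split_ifs <;> rfl
  rw [hf, PySem.List.foldl_append_singleton_eq_map]
  apply List.map_congr_left
  intro ch _
  have hm : PySem.Chars.isIn [ch] chars.toList = true ↔ ch ∈ chars.toList := by
    rw [PySem.Chars.isIn_iff_infix, List.singleton_infix_iff]
  by_cases h : ch ∈ chars.toList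
  · simp [hm.mpr h, h]
  · have hi : PySem.Chars.isIn [ch] chars.toList = false := by
      rw [← Bool.not_eq_true, hm]; exact h
    simp [hi, h]

-- ===== VERDICT (by name: the statement is the Claim_ definition above) =====
theorem remove_chars_from_text_spec : Claim_equal_remove_chars_from_text := by
  intro text chars _
  unfold Spec_remove_chars_from_text
  apply String.toList_injective
  rw [a_toList]
  unfold remove_chars_from_text_alt
  have := alt_toList chars.toList text.toList
  rw [String.ofList_toList] at this
  rw [this]
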